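-- pv_equiv track=rewrite | github.com/MCUARM/kLib | auto/other/bq78350/space_bq78350.py | getSubclassName
-- ===== SOURCE A (Python) =====
-- def getSubclassName(word,i):
-- 	j = getIndexAddress(word,i)
--
-- 	res = ""
-- 	for k in range(i,j):
-- 		if k != i:
-- 			res += " "
-- 		res += word[k]
-- 	return res
--
-- def getIndexAddress(word,i):
-- 	j = i
-- 	while "0x" not in word[j]:
-- 		j+=1
-- 	return j
-- ===== SOURCE B (Python) =====
-- def getSubclassName(word, i):
--     parts = []
--     k = i
--     while "0x" not in word[k]:
--         parts.append(word[k])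
--         k += 1
--     return " ".join(parts)
-- ===== Notes on version B (the rewrite author's own statement) =====
-- stated objective: simpler
-- what changed: Replaces A's two passes (a getIndexAddress helper scanning for the first word containing '0x', then a range(i,j) loop rebuilding the string with manual separator logic) by a single scan that collects words into a list until the '0x' word and returns ' '.join of it, eliminating the helper.
import Mathlib
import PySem

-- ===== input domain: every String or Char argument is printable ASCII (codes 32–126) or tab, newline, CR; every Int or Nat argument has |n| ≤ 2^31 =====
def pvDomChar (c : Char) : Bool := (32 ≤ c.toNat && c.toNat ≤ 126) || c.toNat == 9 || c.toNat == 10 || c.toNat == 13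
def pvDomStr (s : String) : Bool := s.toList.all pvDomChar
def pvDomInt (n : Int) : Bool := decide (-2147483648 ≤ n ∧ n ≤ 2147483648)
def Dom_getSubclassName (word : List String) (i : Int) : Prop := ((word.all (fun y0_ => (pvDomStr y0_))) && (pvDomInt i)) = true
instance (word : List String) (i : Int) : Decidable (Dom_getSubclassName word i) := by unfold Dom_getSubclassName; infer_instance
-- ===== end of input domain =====

-- B folds A's two passes (find-the-'0x'-word helper, then a range(i,j) rebuild with manual
-- separator logic) into one collecting scan finished by ' '.join — simpler, same cost.

-- ===== PORT A =====
-- getIndexAddress's while loop, fuel-based; `none` = the loop ran off the list (IndexError,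
-- excluded by Pre_).  word[j] is PySem.List.pyGet? (Python negative indexing).
def pvIdxLoopA (word : List String) : Nat → Int → Option Int
  | 0, _ => none
  | n+1, j =>
    match PySem.List.pyGet? word j with
    | none => none
    | some s => if PySem.Str.isIn "0x" s then some j else pvIdxLoopA word n (j+1)

-- fuel bound: the Python loop performs at most len(word) - j accesses before raising
def pvFuel (word : List String) (i : Int) : Nat := ((word.length : Int) - i).toNat + 1

-- string concatenation ported over List Char (exact; Lean's String.append is kernel-opaque)
def getSubclassName (word : List String) (i : Int) : String :=
  match pvIdxLoopA word (pvFuel word i) i with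
  | none => ""   -- IndexError in Python: outside Pre_
  | some j =>
    String.ofList ((PySem.List.pyRange i j 1).foldl
      (fun res k => (if k ≠ i then res ++ [' '] else res) ++ (PySem.List.pyGetD word k "").toList) [])

-- ===== PORT B =====
-- B's single while loop: collect words until one contains "0x", then " ".join(parts).
def pvCollectB (word : List String) : Nat → Int → List String → String
  | 0, _, _ => ""
  | n+1, k, parts =>
    match PySem.List.pyGet? word k with
    | none => ""   -- IndexError in Python: outside Pre_
    | some s =>
      if PySem.Str.isIn "0x" s then PySem.Str.join " " parts
      else pvCollectB word n (k+1) (parts ++ [s])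

def getSubclassName_alt (word : List String) (i : Int) : String :=
  pvCollectB word (pvFuel word i) i []

-- ===== PRECONDITION & SPEC =====
-- Pre_ = exactly the inputs on which Python A returns (both programs raise IndexError when no
-- word from position i onward — negative i scans Python-style from the wrapped position and
-- then the whole list — contains "0x").
def Pre_getSubclassName (word : List String) (i : Int) : Prop :=
  if i < 0 then
    -(word.length : Int) ≤ i ∧ word.any (fun s => PySem.Str.isIn "0x" s) = true
  else
    (word.drop i.toNat).any (fun s => PySem.Str.isIn "0x" s) = true
instance (word : List String) (i : Int) : Decidable (Pre_getSubclassName word i) := by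
  unfold Pre_getSubclassName; infer_instance

def pvWitness_getSubclassName : List String × Int := (["ab", "cd", "0x12"], 0)

def Spec_getSubclassName (word : List String) (i : Int) (out : String) : Prop := out = getSubclassName_alt word i
instance (word : List String) (i : Int) (out : String) : Decidable (Spec_getSubclassName word i out) := by unfold Spec_getSubclassName; infer_instance

-- ===== CLAIM (what is proved, stated in full; the proofs are below) =====
def Claim_equal_getSubclassName : Prop := ∀ (word : List String) (i : Int), Dom_getSubclassName word i → Pre_getSubclassName word i → Spec_getSubclassName word i (getSubclassName word i)

-- ===== LEMMAS AND PROOFS =====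

-- the index found by A's helper loop is ≥ the start index
theorem pvIdxLoopA_le (word : List String) :
    ∀ (n : Nat) (j m : Int), pvIdxLoopA word n j = some m → j ≤ m := by
  intro n
  induction n with
  | zero => intro j m h; simp [pvIdxLoopA] at h
  | succ n ih =>
    intro j m h
    simp only [pvIdxLoopA] at h
    cases hg : PySem.List.pyGet? word j with
    | none => rw [hg] at h; simp at h
    | some s =>
      rw [hg] at h
      dsimp only at h
      split_ifs at h with hc
      · injection h with h; omega
      · have := ih (j+1) m h; omega

-- appending " " + word for each k equals flatMap of (' ' :: word)
theorem pv_tailfold (f : Int → List Char) :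
    ∀ (ks : List Int) (acc : List Char),
      ks.foldl (fun res k => res ++ ' ' :: f k) acc = acc ++ ks.flatMap (fun k => ' ' :: f k) := by
  intro ks
  induction ks with
  | nil => intro acc; simp
  | cons k ks ih => intro acc; simp [List.foldl_cons, ih]

-- " ".join on a nonempty list, in flatMap form
theorem pv_join_cons (p : List Char) (rest : List (List Char)) :
    PySem.Chars.join [' '] (p :: rest) = p ++ rest.flatMap (fun q => ' ' :: q) := by
  induction rest generalizing p with
  | nil => simp [PySem.Chars.join, List.intercalate]
  | cons q rs ih =>
    rw [PySem.Chars.join_cons_cons, ih q]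
    simp

-- A's separator-handling fold over range(i, m) IS " ".join of the mapped words
theorem pv_foldA_eq_join (word : List String) (i m : Int) :
    (PySem.List.pyRange i m 1).foldl
      (fun res k => (if k ≠ i then res ++ [' '] else res) ++ (PySem.List.pyGetD word k "").toList) []
    = PySem.Chars.join [' ']
        ((PySem.List.pyRange i m 1).map (fun k => (PySem.List.pyGetD word k "").toList)) := by
  by_cases h : i < m
  · rw [PySem.List.pyRange_one_cons h]
    simp only [List.foldl_cons, List.map_cons]
    have hcong : (PySem.List.pyRange (i+1) m 1).foldl
        (fun res k => (if k ≠ i then res ++ [' '] else res) ++ (PySem.List.pyGetD word k "").toList)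
        ((PySem.List.pyGetD word i "").toList)
      = (PySem.List.pyRange (i+1) m 1).foldl
        (fun res k => res ++ ' ' :: (PySem.List.pyGetD word k "").toList)
        ((PySem.List.pyGetD word i "").toList) := by
      apply PySem.List.foldl_congr_mem
      intro acc k hk
      have : i + 1 ≤ k := (PySem.List.mem_pyRange_one.mp hk).1
      have hne : k ≠ i := by omega
      simp [hne]
    rw [show (if i ≠ i then ([] : List Char) ++ [' '] else []) ++ (PySem.List.pyGetD word i "").toList
          = (PySem.List.pyGetD word i "").toList by simp]
    rw [hcong, pv_tailfold, pv_join_cons]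
    simp [List.flatMap_map]
  · rw [PySem.List.pyRange_one_eq_nil (by omega)]
    simp only [List.map_nil, List.foldl_nil]
    decide

-- B's collecting loop, expressed through A's index-finding loop (same fuel, same scan)
theorem pv_collect_eq (word : List String) :
    ∀ (n : Nat) (j : Int) (parts : List String),
      pvCollectB word n j parts =
        match pvIdxLoopA word n j with
        | none => ""
        | some m => PySem.Str.join " "
            (parts ++ (PySem.List.pyRange j m 1).map (fun k => PySem.List.pyGetD word k "")) := by
  intro n
  induction n with
  | zero => intro j parts; simp [pvCollectB, pvIdxLoopA]
  | succ n ih =>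
    intro j parts
    simp only [pvCollectB, pvIdxLoopA]
    cases hg : PySem.List.pyGet? word j with
    | none => simp
    | some s =>
      by_cases hc : PySem.Str.isIn "0x" s
      · simp only [hc, if_true]
        rw [PySem.List.pyRange_one_eq_nil (by omega)]
        simp
      · simp only [hc, if_false, Bool.false_eq_true]
        rw [ih (j+1) (parts ++ [s])]
        cases hl : pvIdxLoopA word n (j+1) with
        | none => rfl
        | some m =>
          have hjm : j + 1 ≤ m := pvIdxLoopA_le word n (j+1) m hl
          have hgd : PySem.List.pyGetD word j "" = s := by
            simp [PySem.List.pyGetD, hg]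
          simp [PySem.List.pyRange_one_cons (show j < m by omega), hgd]

-- ===== VERDICT (by name: the statement is the Claim_ definition above) =====
theorem getSubclassName_spec : Claim_equal_getSubclassName := by
  intro word i _ _
  unfold Spec_getSubclassName getSubclassName getSubclassName_alt
  rw [pv_collect_eq word (pvFuel word i) i []]
  cases h : pvIdxLoopA word (pvFuel word i) i with
  | none => rfl
  | some m =>
    simp only [List.nil_append]
    rw [pv_foldA_eq_join]
    simp [PySem.Str.join, List.map_map]
    rfl
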